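-- pv_equiv track=rewrite | github.com/yihaozhong/LPractice | cubist.py | count_balanced_strings
-- ===== SOURCE A (Python) =====
-- def count_balanced_strings(n, d):
--     MOD = 10**9 + 7
--     dp = [1]*26
--     for _ in range(n-1):
--         dp_new = [0]*26
--         for j in range(26):
--             for k in range(max(0, j-d), min(26, j+d+1)):
--                 dp_new[j] = (dp_new[j] + dp[k]) % MOD
--         dp = dp_new
--     return sum(dp) % MOD
-- ===== SOURCE B (Python) =====
-- def count_balanced_strings(n, d):
--     MOD = 10**9 + 7
--     dp = [1] * 26
--     for _ in range(n - 1):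
--         pre = [0]
--         for x in dp:
--             pre.append(pre[-1] + x)
--         dp = [
--             (pre[min(26, j + d + 1)] - pre[max(0, j - d)]) % MOD
--             if max(0, j - d) < min(26, j + d + 1) else 0
--             for j in range(26)
--         ]
--     return sum(dp) % MOD
-- ===== Notes on version B (the rewrite author's own statement) =====
-- stated objective: faster
-- what changed: Each DP step builds a prefix-sum list once and reads every letter's window sum as a single subtraction, instead of A's inner scan over the up-to-26-wide window for each of the 26 letters.
import Mathlib
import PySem

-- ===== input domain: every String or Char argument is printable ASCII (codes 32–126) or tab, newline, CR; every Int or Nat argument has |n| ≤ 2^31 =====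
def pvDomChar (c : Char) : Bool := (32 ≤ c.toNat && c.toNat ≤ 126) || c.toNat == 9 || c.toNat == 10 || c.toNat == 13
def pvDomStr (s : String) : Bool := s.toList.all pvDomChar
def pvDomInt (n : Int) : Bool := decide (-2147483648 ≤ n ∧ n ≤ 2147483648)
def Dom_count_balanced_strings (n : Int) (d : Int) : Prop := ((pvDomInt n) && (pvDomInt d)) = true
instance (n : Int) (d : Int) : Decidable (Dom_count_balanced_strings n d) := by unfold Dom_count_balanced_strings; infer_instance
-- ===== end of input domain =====

-- B replaces A's innermost per-letter window scan by one prefix-sum pass per step,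
-- so each window sum becomes a single subtraction; identical return values.

def pvMOD : Int := 10 ^ 9 + 7

-- ===== PORT A =====
-- one outer iteration of A: dp_new[j] accumulates (acc + dp[k]) % MOD over k in range(max(0,j-d), min(26,j+d+1))
def pvStepA (d : Int) (dp : List Int) : List Int :=
  (PySem.List.pyRange 0 26 1).map (fun j =>
    (PySem.List.pyRange (max 0 (j - d)) (min 26 (j + d + 1)) 1).foldl
      (fun acc k => PySem.Int.mod (acc + PySem.List.pyGetD dp k 0) pvMOD) 0)

def count_balanced_strings (n : Int) (d : Int) : Int :=
  PySem.Int.mod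
    (((PySem.List.pyRange 0 (n - 1) 1).foldl (fun dp _ => pvStepA d dp)
        (List.replicate 26 (1 : Int))).sum) pvMOD

-- ===== PORT B =====
-- pre = [0]; for x in dp: pre.append(pre[-1] + x)
def pvPresum (dp : List Int) : List Int :=
  dp.foldl (fun pre x => pre ++ [PySem.List.pyGetD pre (-1) 0 + x]) [0]

-- one outer iteration of B: each window sum read off the prefix-sum list
def pvStepB (d : Int) (pre : List Int) : List Int :=
  (PySem.List.pyRange 0 26 1).map (fun j =>
    if max 0 (j - d) < min 26 (j + d + 1) then
      PySem.Int.mod (PySem.List.pyGetD pre (min 26 (j + d + 1)) 0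
        - PySem.List.pyGetD pre (max 0 (j - d)) 0) pvMOD
    else 0)

def count_balanced_strings_alt (n : Int) (d : Int) : Int :=
  PySem.Int.mod
    (((PySem.List.pyRange 0 (n - 1) 1).foldl (fun dp _ => pvStepB d (pvPresum dp))
        (List.replicate 26 (1 : Int))).sum) pvMOD

-- ===== PRECONDITION & SPEC =====
def Spec_count_balanced_strings (n : Int) (d : Int) (out : Int) : Prop := out = count_balanced_strings_alt n d
instance (n : Int) (d : Int) (out : Int) : Decidable (Spec_count_balanced_strings n d out) := by unfold Spec_count_balanced_strings; infer_instance

-- ===== CLAIM (what is proved, stated in full; the proofs are below) =====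
def Claim_equal_count_balanced_strings : Prop := ∀ (n : Int) (d : Int), Dom_count_balanced_strings n d → Spec_count_balanced_strings n d (count_balanced_strings n d)

-- ===== LEMMAS AND PROOFS =====

theorem pvMOD_pos : (0 : Int) < pvMOD := by norm_num [pvMOD]

-- Python's `%` with the positive modulus pvMOD is Int.emod
theorem pvmod_eq (a : Int) : PySem.Int.mod a pvMOD = a % pvMOD :=
  PySem.Int.mod_eq_emod_of_pos pvMOD_pos

-- A's inner modular accumulation is the plain sum, taken mod once at the end
theorem pv_foldmod (dp : List Int) (l : List Int) (s : Int) :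
    l.foldl (fun acc k => PySem.Int.mod (acc + PySem.List.pyGetD dp k 0) pvMOD)
        (PySem.Int.mod s pvMOD)
      = PySem.Int.mod (s + (l.map (fun k => PySem.List.pyGetD dp k 0)).sum) pvMOD := by
  induction l generalizing s with
  | nil => simp
  | cons x t ih =>
      simp only [List.foldl_cons, List.map_cons, List.sum_cons]
      have hstep : PySem.Int.mod (PySem.Int.mod s pvMOD + PySem.List.pyGetD dp x 0) pvMOD
          = PySem.Int.mod (s + PySem.List.pyGetD dp x 0) pvMOD := by
        rw [pvmod_eq s, pvmod_eq, pvmod_eq, Int.emod_add_emod]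
      rw [hstep, ih (s + PySem.List.pyGetD dp x 0), add_assoc]

-- sum of dp over range(0, m) is the sum of dp's first m entries
theorem pv_sum_range (dp : List Int) : ∀ (m : Nat), m ≤ dp.length →
    ((PySem.List.pyRange 0 (m : Int) 1).map (fun k => PySem.List.pyGetD dp k 0)).sum
      = (dp.take m).sum
  | 0, _ => by simp [PySem.List.pyRange_one_eq_nil]
  | (m + 1), hm => by
      have hm' : m ≤ dp.length := Nat.le_of_succ_le hm
      have hmlt : m < dp.length := hm
      rw [show ((m + 1 : Nat) : Int) = (m : Int) + 1 by push_cast; ring,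
        PySem.List.pyRange_one_succ_right (by exact_mod_cast Nat.zero_le m),
        List.map_append, List.sum_append, pv_sum_range dp m hm',
        List.sum_take_succ dp m hmlt]
      simp only [List.map_cons, List.map_nil, List.sum_cons, List.sum_nil, add_zero]
      rw [PySem.List.pyGetD_eq_getElem dp 0 (by exact_mod_cast Nat.zero_le m)
          (by exact_mod_cast hmlt)]
      simp

-- characterisation of the prefix list built by B's append loop
def pvScan (s : Int) : List Int → List Int
  | [] => []
  | x :: t => (s + x) :: pvScan (s + x) t

theorem pvScan_length (s : Int) (l : List Int) : (pvScan s l).length = l.length := by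
  induction l generalizing s with
  | nil => simp [pvScan]
  | cons x t ih => simp [pvScan, ih]

theorem pv_foldpre (l : List Int) (acc : List Int) (x0 : Int) :
    l.foldl (fun pre x => pre ++ [PySem.List.pyGetD pre (-1) 0 + x]) (acc ++ [x0])
      = (acc ++ [x0]) ++ pvScan x0 l := by
  induction l generalizing acc x0 with
  | nil => simp [pvScan]
  | cons y t ih =>
      simp only [List.foldl_cons]
      rw [PySem.List.pyGetD_neg_one_append_singleton]
      have := ih (acc ++ [x0]) (x0 + y)
      simp only [List.append_assoc] at this ⊢
      simpa [pvScan] using this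

theorem pvPresum_eq (dp : List Int) : pvPresum dp = 0 :: pvScan 0 dp := by
  have := pv_foldpre dp [] 0
  simpa [pvPresum] using this

theorem pvScan_getElem : ∀ (l : List Int) (s : Int) (i : Nat) (hi : i < l.length),
    (pvScan s l)[i]'(by rw [pvScan_length]; exact hi) = s + (l.take (i + 1)).sum
  | x :: t, s, 0, _ => by simp [pvScan]
  | x :: t, s, (i + 1), hi => by
      have hj : i < t.length := by simpa using hi
      simp only [pvScan, List.getElem_cons_succ]
      rw [pvScan_getElem t (s + x) i hj]
      simp [List.take_succ_cons]
      ring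

theorem pvPresum_getNat (dp : List Int) (m : Nat) (hm : m ≤ dp.length) :
    (0 :: pvScan 0 dp)[m]'(by simp [pvScan_length]; omega) = (dp.take m).sum := by
  cases m with
  | zero => simp
  | succ i =>
      have hi : i < dp.length := hm
      simp only [List.getElem_cons_succ]
      rw [pvScan_getElem dp 0 i hi]
      simp

-- B's prefix list looked up at t gives the sum of dp's first t entries
theorem pvPresum_get (dp : List Int) (t : Int) (h0 : 0 ≤ t) (ht : t ≤ (dp.length : Int)) :
    PySem.List.pyGetD (pvPresum dp) t 0 = (dp.take t.toNat).sum := by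
  rw [pvPresum_eq]
  rw [PySem.List.pyGetD_eq_getElem (0 :: pvScan 0 dp) 0 h0
    (by simp [pvScan_length]; omega)]
  exact pvPresum_getNat dp t.toNat (by omega)

-- the two step functions agree on lists of length 26
theorem pv_step_eq (d : Int) (dp : List Int) (hlen : dp.length = 26) :
    pvStepA d dp = pvStepB d (pvPresum dp) := by
  unfold pvStepA pvStepB
  apply List.map_congr_left
  intro j _
  by_cases hwin : max 0 (j - d) < min 26 (j + d + 1)
  · rw [if_pos hwin]
    have hlo : (0 : Int) ≤ max 0 (j - d) := le_max_left _ _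
    have hhi : min 26 (j + d + 1) ≤ 26 := min_le_left _ _
    have hhi0 : (0 : Int) ≤ min 26 (j + d + 1) := le_trans hlo (le_of_lt hwin)
    have hmz : PySem.Int.mod (0 : Int) pvMOD = 0 := by rw [pvmod_eq]; simp
    have hfold := pv_foldmod dp
      (PySem.List.pyRange (max 0 (j - d)) (min 26 (j + d + 1)) 1) 0
    rw [hmz, zero_add] at hfold
    rw [hfold]
    have ehi : ((PySem.List.pyRange 0 (min 26 (j + d + 1)) 1).map
        (fun k => PySem.List.pyGetD dp k 0)).sum
          = (dp.take (min 26 (j + d + 1)).toNat).sum := by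
      have := pv_sum_range dp (min 26 (j + d + 1)).toNat (by omega)
      rwa [Int.toNat_of_nonneg hhi0] at this
    have elo : ((PySem.List.pyRange 0 (max 0 (j - d)) 1).map
        (fun k => PySem.List.pyGetD dp k 0)).sum
          = (dp.take (max 0 (j - d)).toNat).sum := by
      have := pv_sum_range dp (max 0 (j - d)).toNat (by omega)
      rwa [Int.toNat_of_nonneg hlo] at this
    have esplit : ((PySem.List.pyRange (max 0 (j - d)) (min 26 (j + d + 1)) 1).map
        (fun k => PySem.List.pyGetD dp k 0)).sum
          = (dp.take (min 26 (j + d + 1)).toNat).sum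
            - (dp.take (max 0 (j - d)).toNat).sum := by
      rw [PySem.List.pyRange_one_append 0 (max 0 (j - d)) (min 26 (j + d + 1)) hlo
        (le_of_lt hwin), List.map_append, List.sum_append, elo] at ehi
      linarith
    rw [esplit, pvPresum_get dp _ hhi0 (by omega),
      pvPresum_get dp _ hlo (by omega)]
  · rw [if_neg hwin, PySem.List.pyRange_one_eq_nil (le_of_not_gt hwin)]
    rfl

-- the iterated loops agree
theorem pv_loop_eq (d : Int) (l : List Int) (dp : List Int) (hlen : dp.length = 26) :
    l.foldl (fun dp _ => pvStepA d dp) dp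
      = l.foldl (fun dp _ => pvStepB d (pvPresum dp)) dp := by
  induction l generalizing dp with
  | nil => rfl
  | cons x t ih =>
      simp only [List.foldl_cons]
      rw [← pv_step_eq d dp hlen]
      exact ih (pvStepA d dp) (by simp [pvStepA, PySem.List.length_pyRange_one])

-- ===== VERDICT (by name: the statement is the Claim_ definition above) =====
theorem count_balanced_strings_spec : Claim_equal_count_balanced_strings := by
  intro n d _
  unfold Spec_count_balanced_strings count_balanced_strings count_balanced_strings_alt
  rw [pv_loop_eq d _ _ (by simp)]
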